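-- pv_equiv track=rewrite | github.com/NeriCarcasci/spar | scripts/generate_builders.py | normalize_tests
-- ===== SOURCE A (Python) =====
-- def normalize_tests(data):
--     if isinstance(data, dict) and "tests" in data:
--         visible = []
--         hidden = []
--         for case in data.get("tests", []):
--             if case.get("visible"):
--                 visible.append(case)
--             else:
--                 hidden.append(case)
--         return visible + hidden
--     visible = data.get("visible", []) if isinstance(data, dict) else []
--     hidden = data.get("hidden", []) if isinstance(data, dict) else []
--     return list(visible) + list(hidden)
-- ===== SOURCE B (Python) =====
-- def normalize_tests(data):
--     if isinstance(data, dict) and "tests" in data: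
--         return sorted(data.get("tests", []), key=lambda c: not c.get("visible"))
--     visible = data.get("visible", []) if isinstance(data, dict) else []
--     hidden = data.get("hidden", []) if isinstance(data, dict) else []
--     return list(visible) + list(hidden)
-- ===== Notes on version B (the rewrite author's own statement) =====
-- stated objective: idiomatic
-- what changed: The two-accumulator partition loop is replaced by a single stable sort on the boolean key 'not c.get("visible")', which puts visible cases first and keeps original order within each group.
import Mathlib
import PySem

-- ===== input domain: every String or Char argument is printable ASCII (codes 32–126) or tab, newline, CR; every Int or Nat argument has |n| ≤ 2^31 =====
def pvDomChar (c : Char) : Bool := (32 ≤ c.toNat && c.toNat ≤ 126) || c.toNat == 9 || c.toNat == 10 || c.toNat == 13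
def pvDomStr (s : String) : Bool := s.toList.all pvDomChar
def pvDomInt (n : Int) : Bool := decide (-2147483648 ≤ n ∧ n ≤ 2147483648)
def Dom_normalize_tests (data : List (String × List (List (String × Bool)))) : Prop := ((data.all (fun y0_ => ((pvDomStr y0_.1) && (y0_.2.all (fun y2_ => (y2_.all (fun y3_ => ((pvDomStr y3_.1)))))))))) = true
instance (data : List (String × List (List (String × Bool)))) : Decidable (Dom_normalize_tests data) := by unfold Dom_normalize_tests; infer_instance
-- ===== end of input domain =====

-- B replaces A's two-accumulator partition loop by one stable sort on the boolean key
-- "not c.get('visible')" (idiomatic; same return value, no side effects in either version).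

-- ===== PORT A =====
-- d.get(k) / 'k in d' on an association list: first match.
def pvLookup {β : Type} (d : List (String × β)) (k : String) : Option β :=
  (d.find? (fun p => p.1 == k)).map (·.2)

-- truthiness of case.get("visible"): None and False are falsy, True is truthy.
def caseVisible (c : List (String × Bool)) : Bool := (pvLookup c "visible").getD false

def normalize_tests (data : List (String × List (List (String × Bool)))) : List (List (String × Bool)) :=
  if (pvLookup data "tests").isSome then
    let pr := ((pvLookup data "tests").getD []).foldl
      (fun (acc : List (List (String × Bool)) × List (List (String × Bool))) case =>
        if caseVisible case then (acc.1 ++ [case], acc.2) else (acc.1, acc.2 ++ [case]))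
      ([], [])
    pr.1 ++ pr.2
  else
    ((pvLookup data "visible").getD []) ++ ((pvLookup data "hidden").getD [])

-- ===== PORT B =====
def normalize_tests_alt (data : List (String × List (List (String × Bool)))) : List (List (String × Bool)) :=
  if (pvLookup data "tests").isSome then
    PySem.List.sorted ((pvLookup data "tests").getD []) (fun c => !(caseVisible c)) false
  else
    ((pvLookup data "visible").getD []) ++ ((pvLookup data "hidden").getD [])

-- ===== PRECONDITION & SPEC =====
def Spec_normalize_tests (data : List (String × List (List (String × Bool)))) (out : List (List (String × Bool))) : Prop := out = normalize_tests_alt data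
instance (data : List (String × List (List (String × Bool)))) (out : List (List (String × Bool))) : Decidable (Spec_normalize_tests data out) := by unfold Spec_normalize_tests; infer_instance

-- ===== CLAIM (what is proved, stated in full; the proofs are below) =====
def Claim_equal_normalize_tests : Prop := ∀ (data : List (String × List (List (String × Bool)))), Dom_normalize_tests data → Spec_normalize_tests data (normalize_tests data)

-- ===== LEMMAS AND PROOFS =====

-- Inserting a true-key element: it goes to the end (true < b never holds on Bool).
theorem insertBy_true {α : Type} (key : α → Bool) (x : α) (hx : key x = true)
    (ys : List α) :
    PySem.List.insertBy (fun a b => decide (key a < key b)) x ys = ys ++ [x] := by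
  apply PySem.List.insertBy_of_forall_not_before
  intro y _
  cases hy : key y <;> simp [hx]

-- Inserting a false-key element into (all-false ++ all-true): it lands between them.
theorem insertBy_false {α : Type} (key : α → Bool) (x : α) (hx : key x = false)
    (F T : List α) (hF : ∀ f ∈ F, key f = false) (hT : ∀ t ∈ T, key t = true) :
    PySem.List.insertBy (fun a b => decide (key a < key b)) x (F ++ T) = (F ++ [x]) ++ T := by
  induction F with
  | nil =>
    cases T with
    | nil => simp [PySem.List.insertBy]
    | cons t T' =>
      have ht : key t = true := hT t (by simp)
      simp [PySem.List.insertBy, hx, ht]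
  | cons f F' ih =>
    have hf : key f = false := hF f (by simp)
    have : decide (key x < key f) = false := by simp [hx, hf]
    simp only [List.cons_append, PySem.List.insertBy, this, Bool.false_eq_true, if_false]
    rw [ih (fun g hg => hF g (by simp [hg]))]

-- The insertion-sort fold with a boolean key partitions: false keys first, stable.
theorem foldl_insertBy_partition {α : Type} (key : α → Bool) (xs : List α) :
    ∀ (F T : List α), (∀ f ∈ F, key f = false) → (∀ t ∈ T, key t = true) →
    List.foldl (fun acc x => PySem.List.insertBy (fun a b => decide (key a < key b)) x acc) (F ++ T) xs
      = (F ++ xs.filter (fun x => !key x)) ++ (T ++ xs.filter key) := by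
  induction xs with
  | nil => intro F T _ _; simp
  | cons x xs ih =>
    intro F T hF hT
    cases hx : key x with
    | false =>
      simp only [List.foldl_cons, insertBy_false key x hx F T hF hT]
      have := ih (F ++ [x]) T
        (by intro f hf; rcases List.mem_append.mp hf with h | h
            · exact hF f h
            · simp at h; simpa [h] using hx) hT
      rw [List.append_assoc] at this ⊢
      rw [this]
      simp [hx]
    | true =>
      simp only [List.foldl_cons, insertBy_true key x hx (F ++ T)]
      rw [List.append_assoc]
      have := ih F (T ++ [x]) hF
        (by intro t ht; rcases List.mem_append.mp ht with h | h
            · exact hT t h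
            · simp at h; simpa [h] using hx)
      rw [this]
      simp [hx]

theorem sorted_bool_key {α : Type} (xs : List α) (key : α → Bool) :
    PySem.List.sorted xs key false = xs.filter (fun x => !key x) ++ xs.filter key := by
  rw [PySem.List.sorted_eq_foldl_insertBy]
  simpa using foldl_insertBy_partition key xs [] [] (by simp) (by simp)

-- A's two-accumulator loop computes the two filters.
theorem partition_foldl (xs : List (List (String × Bool)))
    (v h : List (List (String × Bool))) :
    xs.foldl (fun (acc : List (List (String × Bool)) × List (List (String × Bool))) case =>
        if caseVisible case then (acc.1 ++ [case], acc.2) else (acc.1, acc.2 ++ [case])) (v, h)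
      = (v ++ xs.filter caseVisible, h ++ xs.filter (fun c => !caseVisible c)) := by
  induction xs generalizing v h with
  | nil => simp
  | cons x xs ih =>
    cases hx : caseVisible x <;>
      simp [hx, ih, List.append_assoc]

-- ===== VERDICT (by name: the statement is the Claim_ definition above) =====
theorem normalize_tests_spec : Claim_equal_normalize_tests := by
  intro data _
  unfold Spec_normalize_tests normalize_tests normalize_tests_alt
  by_cases h : (pvLookup data "tests").isSome
  · simp only [h, if_true]
    rw [partition_foldl, sorted_bool_key]
    simp
  · simp [h]
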